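-- pv_equiv track=rewrite | github.com/kandatata111/tradingview-webhook | trend_strength_calculator_v2_backup_before_fix.py | _check_3tf_alignment
-- ===== SOURCE A (Python) =====
-- TF_HIERARCHY = ['5m', '15m', '1H', '4H', 'D', 'W', 'M', 'Y']
--
-- def _check_3tf_alignment(row_order, all_states):
--     """
--     3TFが揃っているかを判定
--
--     3TFの定義：短期MA > 中期MA > 長期MA（上昇）または 短期MA < 中期MA < 長期MA（下降）
--     row_orderのMAの並びで判定
--
--     Returns:
--         (is_3tf, trend_direction)
--         - is_3tf: bool（3TF揃っているか）
--         - trend_direction: 'up', 'down', 'range'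
--     """
--     if not row_order:
--         return False, 'range'
--
--     # row_orderをリストに変換
--     order_list = [x.strip() for x in row_order.split(',')]
--
--     # priceを除外してMA（雲）のみの配列を取得
--     clouds_only = [x for x in order_list if x != 'price']
--
--     if len(clouds_only) < 3:
--         return False, 'range'
--
--     # 各雲の階層インデックスを取得
--     cloud_indices = []
--     for cloud in clouds_only:
--         try:
--             idx = TF_HIERARCHY.index(cloud)
--             cloud_indices.append((cloud, idx))
--         except ValueError:
--             continue
--
--     if len(cloud_indices) < 3:
--         return False, 'range'
--
--     # 連続する3つの雲が階層順序に沿っているかチェック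
--     # row_orderは雲と価格の位置関係を表す：
--     # - 上昇トレンド: price,短期,中期,長期 → priceが最初（価格が雲より上）
--     # - 下降トレンド: 長期,中期,短期,price → priceが最後（価格が雲より下）
--
--     # priceの位置を確認
--     if 'price' not in order_list:
--         return False, 'range'
--
--     price_index = order_list.index('price')
--
--     # 連続する3つの雲が階層順序に沿っているかチェック
--     for i in range(len(cloud_indices) - 2):
--         three_clouds = cloud_indices[i:i+3]
--         indices = [idx for _, idx in three_clouds]
--
--         # 短期→中期→長期の順序で並んでいるか
--         if indices[0] < indices[1] < indices[2]:
--             # priceが雲より上（最初）なら上昇トレンド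
--             if price_index == 0:
--                 return True, 'up'
--             # priceが雲より下（最後）なら下降トレンド
--             else:
--                 return True, 'down'
--
--         # 長期→中期→短期の順序で並んでいるか
--         if indices[0] > indices[1] > indices[2]:
--             # priceが雲より上（最初）なら上昇トレンド
--             if price_index == 0:
--                 return True, 'up'
--             # priceが雲より下（最後）なら下降トレンド
--             else:
--                 return True, 'down'
--
--     # 3TF揃わず
--     return False, 'range'
-- ===== SOURCE B (Python) =====
-- TF_HIERARCHY = ['5m', '15m', '1H', '4H', 'D', 'W', 'M', 'Y']
--
-- def _check_3tf_alignment(row_order, all_states):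
--     # Single-pass state machine over the tokens: no intermediate lists, no
--     # windows, no staged guards; every early (False,'range') exit of the
--     # original collapses into the final check.
--     price_seen = price_first = found = False
--     prev2 = prev1 = None
--     for pos, tok in enumerate(row_order.split(',')):
--         tok = tok.strip()
--         if tok == 'price':
--             if not price_seen:
--                 price_seen = True
--                 price_first = (pos == 0)
--         elif tok in TF_HIERARCHY:
--             idx = TF_HIERARCHY.index(tok)
--             if prev2 is not None and (prev2 < prev1 < idx or prev2 > prev1 > idx):
--                 found = True
--             prev2, prev1 = prev1, idx
--     if price_seen and found:
--         return True, 'up' if price_first else 'down'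
--     return False, 'range'
-- ===== Notes on version B (the rewrite author's own statement) =====
-- stated objective: alternative
-- what changed: A's staged passes (strip list, price filter, index list with try/except, two length guards, membership check, index(), sliding 3-window loop) are replaced by one enumerate fold over the raw tokens carrying a 5-field state (price seen/first, last two hierarchy indices, found flag); all early exits collapse into a single final check.
import Mathlib
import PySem

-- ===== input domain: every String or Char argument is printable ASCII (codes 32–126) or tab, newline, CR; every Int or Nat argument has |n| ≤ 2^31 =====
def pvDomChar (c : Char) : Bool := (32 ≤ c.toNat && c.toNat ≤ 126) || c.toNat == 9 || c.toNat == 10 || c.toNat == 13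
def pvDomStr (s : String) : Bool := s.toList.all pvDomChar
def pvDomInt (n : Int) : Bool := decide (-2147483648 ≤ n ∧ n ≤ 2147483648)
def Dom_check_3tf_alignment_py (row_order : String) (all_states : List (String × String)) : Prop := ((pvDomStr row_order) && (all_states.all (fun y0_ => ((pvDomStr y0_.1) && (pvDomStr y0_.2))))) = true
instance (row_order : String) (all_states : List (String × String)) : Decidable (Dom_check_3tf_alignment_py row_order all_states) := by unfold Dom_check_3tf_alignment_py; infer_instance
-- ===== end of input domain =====

-- B replaces A's staged passes (strip list, price filter, index list, length
-- guards, membership, sliding 3-window loop) by ONE enumerate fold carrying a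
-- 5-field state; 'all_states' is unused by the Python function, so both ports
-- ignore it.

-- ===== PORT A =====
def pvTF : List String := ["5m", "15m", "1H", "4H", "D", "W", "M", "Y"]

-- A's window loop: for i in range(len-2), test cloud_indices[i:i+3] for strict
-- monotonicity in either direction, returning at the first hit.
def pvScanA (price_index : Nat) : List (String × Int) → Bool × String
  | (_, a) :: (nb, b) :: (nc, c) :: rest =>
    if a < b ∧ b < c then (true, if price_index = 0 then "up" else "down")
    else if a > b ∧ b > c then (true, if price_index = 0 then "up" else "down")
    else pvScanA price_index ((nb, b) :: (nc, c) :: rest)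
  | _ => (false, "range")

def check_3tf_alignment_py (row_order : String) (all_states : List (String × String)) : Bool × String :=
  if row_order = "" then (false, "range")
  else
    let order_list := ((PySem.Str.split? row_order ",").getD []).map PySem.Str.strip
    let clouds_only := order_list.filter (fun x => x != "price")
    if clouds_only.length < 3 then (false, "range")
    else
      -- try/except around TF_HIERARCHY.index: append only on success
      let cloud_indices := clouds_only.foldl (fun acc cloud =>
        match PySem.List.index? pvTF cloud with
        | some idx => acc ++ [(cloud, (idx : Int))]
        | none => acc) []
      if cloud_indices.length < 3 then (false, "range")
      else if ¬ order_list.contains "price" then (false, "range")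
      else
        let price_index := (PySem.List.index? order_list "price").getD 0
        pvScanA price_index cloud_indices

-- ===== PORT B =====
-- Source B's monotone-triple test 'prev2 < prev1 < idx or prev2 > prev1 > idx'
def pvMono (a b c : Int) : Bool := decide ((a < b ∧ b < c) ∨ (a > b ∧ b > c))

-- one iteration of Source B's loop body; state = (price_seen, price_first, found, prev2, prev1).
-- (Python only tests 'prev2 is not None'; prev2 is set only after prev1, so the
-- (some, none) pattern is unreachable — the match returns false there.)
def pvStepB (st : Bool × Bool × Bool × Option Int × Option Int) (pt : Int × String) :
    Bool × Bool × Bool × Option Int × Option Int :=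
  match st with
  | (ps, pf, fd, p2, p1) =>
    let tok := PySem.Str.strip pt.2
    if tok = "price" then
      if ps then (ps, pf, fd, p2, p1)
      else (true, decide (pt.1 = 0), fd, p2, p1)
    else
      match PySem.List.index? pvTF tok with
      | some i =>
        let fd' := fd || (match p2, p1 with
          | some a, some b => pvMono a b (i : Int)
          | _, _ => false)
        (ps, pf, fd', p1, some (i : Int))
      | none => (ps, pf, fd, p2, p1)

def check_3tf_alignment_py_alt (row_order : String) (all_states : List (String × String)) : Bool × String :=
  let toks := (PySem.Str.split? row_order ",").getD []
  let st := (PySem.List.enumerate toks 0).foldl pvStepB (false, false, false, none, none)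
  if st.1 && st.2.2.1 then (true, if st.2.1 then "up" else "down")
  else (false, "range")

-- ===== PRECONDITION & SPEC =====
def Spec_check_3tf_alignment_py (row_order : String) (all_states : List (String × String)) (out : Bool × String) : Prop := out = check_3tf_alignment_py_alt row_order all_states
instance (row_order : String) (all_states : List (String × String)) (out : Bool × String) : Decidable (Spec_check_3tf_alignment_py row_order all_states out) := by unfold Spec_check_3tf_alignment_py; infer_instance

-- ===== CLAIM (what is proved, stated in full; the proofs are below) =====
def Claim_equal_check_3tf_alignment_py : Prop := ∀ (row_order : String) (all_states : List (String × String)), Dom_check_3tf_alignment_py row_order all_states → Spec_check_3tf_alignment_py row_order all_states (check_3tf_alignment_py row_order all_states)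

-- ===== LEMMAS AND PROOFS =====

-- the hierarchy-index subsequence that B's loop feeds through (prev2, prev1)
def pvIdxs : List String → List Int
  | [] => []
  | t :: r =>
    let tok := PySem.Str.strip t
    if tok = "price" then pvIdxs r
    else match PySem.List.index? pvTF tok with
      | some i => (i : Int) :: pvIdxs r
      | none => pvIdxs r

-- "some window of 3 consecutive entries is strictly monotone"
def pvHasT : List Int → Bool
  | a :: b :: c :: r => pvMono a b c || pvHasT (b :: c :: r)
  | _ => false

-- B's found flag as a recursion over the bare index list
def pvTrip : Option Int → Option Int → List Int → Bool
  | _, _, [] => false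
  | p2, p1, i :: r =>
    (match p2, p1 with | some a, some b => pvMono a b i | _, _ => false) || pvTrip p1 (some i) r

-- B's (prev2, prev1) after feeding an index list
def pvPrevs : Option Int → Option Int → List Int → Option Int × Option Int
  | p2, p1, [] => (p2, p1)
  | _, p1, i :: r => pvPrevs p1 (some i) r

theorem pvFold_char (l : List String) (n : Int) (ps pf fd : Bool) (p2 p1 : Option Int) :
    (PySem.List.enumerate l n).foldl pvStepB (ps, pf, fd, p2, p1)
    = ( ps || (l.map PySem.Str.strip).contains "price",
        (if ps then pf else
          match PySem.List.index? (l.map PySem.Str.strip) "price" with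
          | some j => decide (n + (j : Int) = 0)
          | none => pf),
        fd || pvTrip p2 p1 (pvIdxs l),
        pvPrevs p2 p1 (pvIdxs l) ) := by
  induction l generalizing n ps pf fd p2 p1 with
  | nil => simp [pvIdxs, pvTrip, pvPrevs, PySem.List.enumerate_nil]
  | cons t r ih =>
    rw [PySem.List.enumerate_cons, List.foldl_cons]
    by_cases hp : PySem.Str.strip t = "price"
    · have hidx0 : PySem.List.index? ((t :: r).map PySem.Str.strip) "price" = some 0 := by
        rw [List.map_cons, hp]
        exact PySem.List.index?_cons_self _ _
      have hcont : ((t :: r).map PySem.Str.strip).contains "price" = true := by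
        rw [List.map_cons, hp]
        simp
      have hids : pvIdxs (t :: r) = pvIdxs r := by rw [pvIdxs]; simp [hp]
      by_cases hps : ps = true
      · have hstep : pvStepB (ps, pf, fd, p2, p1) (n, t) = (ps, pf, fd, p2, p1) := by
          simp [pvStepB, hp, hps]
        rw [hstep, ih, hidx0, hids, hcont]
        simp [hps]
      · simp only [Bool.not_eq_true] at hps
        have hstep : pvStepB (ps, pf, fd, p2, p1) (n, t) = (true, decide (n = 0), fd, p2, p1) := by
          simp [pvStepB, hp, hps]
        rw [hstep, ih, hidx0, hids]
        simp [hps, hp]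
    · have hidx : PySem.List.index? ((t :: r).map PySem.Str.strip) "price"
          = (PySem.List.index? (r.map PySem.Str.strip) "price").map (· + 1) := by
        rw [List.map_cons, PySem.List.index?_cons_of_ne _ hp]
      have hpf : ∀ pf' : Bool,
          (if ps then pf' else
            match PySem.List.index? (r.map PySem.Str.strip) "price" with
            | some j => decide ((n + 1) + (j : Int) = 0)
            | none => pf')
          = (if ps then pf' else
            match PySem.List.index? ((t :: r).map PySem.Str.strip) "price" with
            | some j => decide (n + (j : Int) = 0)
            | none => pf') := by
        intro pf'
        rw [hidx]
        cases PySem.List.index? (r.map PySem.Str.strip) "price" with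
        | none => rfl
        | some j =>
          simp only [Option.map_some]
          congr 1
          rw [decide_eq_decide]
          push_cast
          omega
      have hcont : ((t :: r).map PySem.Str.strip).contains "price"
          = ((r.map PySem.Str.strip).contains "price") := by
        rw [List.map_cons]
        have h2 : ¬ ("price" = PySem.Str.strip t) := fun h => hp h.symm
        simp [h2]
      cases hi : PySem.List.index? pvTF (PySem.Str.strip t) with
      | none =>
        have hstep : pvStepB (ps, pf, fd, p2, p1) (n, t) = (ps, pf, fd, p2, p1) := by
          simp only [pvStepB]
          rw [if_neg hp, hi]
        have hids : pvIdxs (t :: r) = pvIdxs r := by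
          rw [pvIdxs]
          rw [if_neg hp, hi]
        rw [hstep, ih, hpf, hids, hcont]
      | some i =>
        have hstep : pvStepB (ps, pf, fd, p2, p1) (n, t)
            = (ps, pf,
               fd || (match p2, p1 with | some a, some b => pvMono a b (i : Int) | _, _ => false),
               p1, some (i : Int)) := by
          simp only [pvStepB]
          rw [if_neg hp, hi]
        have hids : pvIdxs (t :: r) = (i : Int) :: pvIdxs r := by
          rw [pvIdxs]
          rw [if_neg hp, hi]
        rw [hstep, ih, hpf, hids, hcont]
        simp only [pvTrip, pvPrevs, Bool.or_assoc]

-- starting from two seen indices, pvTrip is the 3-window test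
theorem pvTrip_two (a b : Int) (l : List Int) :
    pvTrip (some a) (some b) l = pvHasT (a :: b :: l) := by
  induction l generalizing a b with
  | nil => simp [pvTrip, pvHasT]
  | cons c r ih => rw [pvTrip, ih, pvHasT]

theorem pvTrip_none (l : List Int) : pvTrip none none l = pvHasT l := by
  match l with
  | [] => rfl
  | [a] => rfl
  | a :: b :: r =>
    have h1 : pvTrip none none (a :: b :: r) = pvTrip (some a) (some b) r := by
      simp [pvTrip]
    rw [h1, pvTrip_two]

theorem pvHasT_length (l : List Int) (h : pvHasT l = true) : 3 ≤ l.length := by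
  match l with
  | [] => simp [pvHasT] at h
  | [a] => simp [pvHasT] at h
  | [a, b] => simp [pvHasT] at h
  | a :: b :: c :: r => simp

-- A's filtering foldl builds the filterMap of its success cases.
theorem pvFoldl_filterMap (f : String → Option Nat) (l : List String)
    (acc : List (String × Int)) :
    l.foldl (fun acc cloud =>
      match f cloud with
      | some idx => acc ++ [(cloud, (idx : Int))]
      | none => acc) acc
    = acc ++ l.filterMap (fun c => (f c).map (fun i => (c, (i : Int)))) := by
  induction l generalizing acc with
  | nil => simp
  | cons x xs ih =>
    rw [List.foldl_cons, List.filterMap_cons]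
    cases h : f x with
    | none => simpa using ih acc
    | some i =>
      rw [ih]
      simp

-- projecting the (name, index) pairs to the bare index list
theorem pvSnd_filterMap (f : String → Option Nat) (l : List String) :
    (l.filterMap (fun c => (f c).map (fun i => (c, (i : Int))))).map (·.2)
    = l.filterMap (fun c => (f c).map (fun i => (i : Int))) := by
  induction l with
  | nil => rfl
  | cons x xs ih =>
    rw [List.filterMap_cons, List.filterMap_cons]
    cases h : f x with
    | none => simpa using ih
    | some i =>
      show ((x, (i : Int)) :: _).map (·.2) = ((i : Int) :: _)
      rw [List.map_cons, ih]

-- pvIdxs over the raw tokens = A's index list over the stripped, price-filtered tokens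
theorem pvIdxs_eq (l : List String) :
    pvIdxs l = ((l.map PySem.Str.strip).filter (fun x => x != "price")).filterMap
      (fun c => (PySem.List.index? pvTF c).map (fun i => (i : Int))) := by
  induction l with
  | nil => rfl
  | cons t r ih =>
    rw [pvIdxs, List.map_cons, List.filter_cons]
    by_cases hp : PySem.Str.strip t = "price"
    · simp [hp, ih]
    · have : (PySem.Str.strip t != "price") = true := by simp [hp]
      rw [if_neg hp, this, if_pos rfl, List.filterMap_cons, ← ih]
      cases hi : PySem.List.index? pvTF (PySem.Str.strip t) <;> simp

-- A's sliding-window scan in terms of pvHasT on the projected indices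
theorem pvScanA_eq (p : Nat) (l : List (String × Int)) :
    pvScanA p l = if pvHasT (l.map (·.2)) then (true, if p = 0 then "up" else "down")
                  else (false, "range") := by
  induction l with
  | nil => simp [pvScanA, pvHasT]
  | cons x xs ih =>
    match x, xs with
    | (nx, a), [] => simp [pvScanA, pvHasT]
    | (nx, a), [(ny, b)] => simp [pvScanA, pvHasT]
    | (nx, a), (ny, b) :: (nz, c) :: rest =>
      rw [pvScanA]
      simp only [List.map_cons] at ih ⊢
      simp only [pvHasT]
      rw [ih]
      by_cases h1 : a < b ∧ b < c
      · simp [h1, pvMono]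
      · by_cases h2 : a > b ∧ b > c
        · simp [h1, h2, pvMono]
        · simp [h1, h2, pvMono]

-- let-free restatement of A's body on the stripped token list
def pvA2 (ol : List String) : Bool × String :=
  if (ol.filter (fun x => x != "price")).length < 3 then (false, "range")
  else
    if ((ol.filter (fun x => x != "price")).foldl (fun acc cloud =>
        match PySem.List.index? pvTF cloud with
        | some idx => acc ++ [(cloud, (idx : Int))]
        | none => acc) []).length < 3 then (false, "range")
    else if ¬ ol.contains "price" then (false, "range")
    else
      pvScanA ((PySem.List.index? ol "price").getD 0)
        ((ol.filter (fun x => x != "price")).foldl (fun acc cloud =>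
          match PySem.List.index? pvTF cloud with
          | some idx => acc ++ [(cloud, (idx : Int))]
          | none => acc) [])

theorem pvA2_eq (ro : String) (as : List (String × String)) :
    check_3tf_alignment_py ro as
    = if ro = "" then (false, "range") else pvA2 (((PySem.Str.split? ro ",").getD []).map PySem.Str.strip) := rfl

-- B's body, after the fold characterization
theorem pvB_eq (ro : String) (as : List (String × String)) :
    check_3tf_alignment_py_alt ro as
    = (let toks := (PySem.Str.split? ro ",").getD []
       let ol := toks.map PySem.Str.strip
       if ol.contains "price" && pvHasT (pvIdxs toks)
       then (true,
          if (match PySem.List.index? ol "price" with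
              | some j => decide ((0 : Int) + (j : Int) = 0)
              | none => false)
          then "up" else "down")
       else (false, "range")) := by
  simp only [check_3tf_alignment_py_alt]
  rw [pvFold_char, pvTrip_none]
  simp

-- the two bodies agree on every token list
theorem pvMain (toks : List String) :
    pvA2 (toks.map PySem.Str.strip)
    = (if (toks.map PySem.Str.strip).contains "price" && pvHasT (pvIdxs toks)
       then (true,
          if (match PySem.List.index? (toks.map PySem.Str.strip) "price" with
              | some j => decide ((0 : Int) + (j : Int) = 0)
              | none => false)
          then "up" else "down")
       else (false, "range")) := by
  unfold pvA2
  rw [pvFoldl_filterMap (PySem.List.index? pvTF), List.nil_append, pvScanA_eq,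
    pvSnd_filterMap (PySem.List.index? pvTF), ← pvIdxs_eq]
  cases hc : (toks.map PySem.Str.strip).contains "price" with
  | false =>
    split_ifs <;> first | rfl | simp_all
  | true =>
    cases ht : pvHasT (pvIdxs toks) with
    | false =>
      split_ifs <;> first | rfl | simp_all
    | true =>
      have hlen3 : 3 ≤ (pvIdxs toks).length := pvHasT_length _ ht
      have hlen2 : (pvIdxs toks).length
          = (((toks.map PySem.Str.strip).filter (fun x => x != "price")).filterMap
              (fun c => (PySem.List.index? pvTF c).map (fun i => (c, (i : Int))))).length := by
        rw [pvIdxs_eq, ← pvSnd_filterMap (PySem.List.index? pvTF), List.length_map]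
      have hcl : (pvIdxs toks).length
          ≤ ((toks.map PySem.Str.strip).filter (fun x => x != "price")).length := by
        rw [pvIdxs_eq]
        exact List.length_filterMap_le _ _
      rw [if_neg (by omega), if_neg (by omega : ¬ _ < 3), if_neg (by simp),
        if_pos rfl, if_pos (show (true && true) = true from rfl)]
      obtain ⟨j, hj⟩ : ∃ j, PySem.List.index? (toks.map PySem.Str.strip) "price" = some j :=
        Option.isSome_iff_exists.mp
          ((PySem.List.index?_isSome_iff (toks.map PySem.Str.strip) "price").mpr (by simpa using hc))
      rw [hj]
      rcases Nat.eq_zero_or_pos j with hj0 | hj0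
      · simp [hj0]
      · have h1 : ¬ (j = 0) := by omega
        have h2 : ¬ ((0 : Int) + (j : Int) = 0) := by omega
        simp [h1]

-- ===== VERDICT (by name: the statement is the Claim_ definition above) =====
theorem check_3tf_alignment_py_spec : Claim_equal_check_3tf_alignment_py := by
  intro row_order all_states _
  unfold Spec_check_3tf_alignment_py
  rw [pvA2_eq, pvB_eq]
  by_cases h0 : row_order = ""
  · subst h0
    rw [if_pos rfl]
    decide
  · rw [if_neg h0, pvMain]
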